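-- pv_equiv track=rewrite | github.com/dfficult/very_useful_bot | dc_bot/wordle.py | turn_lower_to_upper
-- ===== SOURCE A (Python) =====
-- def turn_lower_to_upper(word: str) -> str:
--     """
--     Turns lowercase letter to upper case.\n
--     Example: "hello" returns "HELLO".\n
--     Return SyntaxError when word is not A ~ Z or a ~ z.\n
--     """
--     result = ""
--     for i in range(len(word)):
--         ascii_value = ord(word[i])
--         if ascii_value >= 65 and ascii_value <= 90: # A~Z
--             result += chr(ascii_value)
--         elif ascii_value >= 97 and ascii_value <= 122: # a~z
--             result += chr(ascii_value - 32)
--         else: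
--             raise SyntaxError("Not English")
--     return result
-- ===== SOURCE B (Python) =====
-- def turn_lower_to_upper(word: str) -> str:
--     if not all('A' <= c <= 'Z' or 'a' <= c <= 'z' for c in word):
--         raise SyntaxError("Not English")
--     return word.upper()
-- ===== Notes on version B (the rewrite author's own statement) =====
-- stated objective: simpler
-- what changed: Replaces the interleaved per-character ord/chr loop (validate+convert+concatenate in one pass) with a separate all-quantifier validation pass followed by a single str.upper() call.
import Mathlib
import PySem

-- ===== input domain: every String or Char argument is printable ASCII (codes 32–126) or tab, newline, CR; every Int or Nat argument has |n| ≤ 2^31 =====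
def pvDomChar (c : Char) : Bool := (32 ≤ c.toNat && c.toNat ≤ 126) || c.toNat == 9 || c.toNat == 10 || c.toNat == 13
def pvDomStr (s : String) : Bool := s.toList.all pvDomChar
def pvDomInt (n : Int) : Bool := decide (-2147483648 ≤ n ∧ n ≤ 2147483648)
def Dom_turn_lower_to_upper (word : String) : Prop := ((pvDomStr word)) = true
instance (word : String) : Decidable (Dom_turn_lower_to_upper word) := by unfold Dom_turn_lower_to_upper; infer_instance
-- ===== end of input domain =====

-- B separates validation (all chars are ASCII letters) from transformation (one str.upper() call),
-- replacing A's single loop of per-character ord/chr arithmetic and string concatenation; objective: simpler.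


-- ===== PORT A =====
-- A loops over the characters, appending A–Z unchanged and a–z shifted by -32 to `result`;
-- on any other character it raises SyntaxError (those inputs are excluded by Pre_, the `else`
-- branch keeps the accumulator unchanged and is never reached inside Pre_).
def turn_lower_to_upper (word : String) : String :=
  String.ofList (word.toList.foldl (fun result c =>
    let ascii_value := c.toNat
    if 65 ≤ ascii_value ∧ ascii_value ≤ 90 then result ++ [Char.ofNat ascii_value]
    else if 97 ≤ ascii_value ∧ ascii_value ≤ 122 then result ++ [Char.ofNat (ascii_value - 32)]
    else result) [])

-- ===== PORT B =====
-- B: validate every character is an ASCII letter, then one upper() call; the `else` branch is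
-- B's SyntaxError, excluded by Pre_ (value there is irrelevant to the claim).
def turn_lower_to_upper_alt (word : String) : String :=
  if word.toList.all (fun c => ('A' ≤ c && c ≤ 'Z') || ('a' ≤ c && c ≤ 'z')) then
    PySem.Str.upper word
  else word

-- ===== PRECONDITION & SPEC =====
-- Pre_ excludes exactly the inputs on which the Python A (and B) raise SyntaxError:
-- a word containing any character that is not an ASCII letter.
def Pre_turn_lower_to_upper (word : String) : Prop :=
  word.toList.all (fun c => decide ((65 ≤ c.toNat ∧ c.toNat ≤ 90) ∨ (97 ≤ c.toNat ∧ c.toNat ≤ 122))) = true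
instance (word : String) : Decidable (Pre_turn_lower_to_upper word) := by
  unfold Pre_turn_lower_to_upper; infer_instance
def pvWitness_turn_lower_to_upper : String := "aZ"

def Spec_turn_lower_to_upper (word : String) (out : String) : Prop := out = turn_lower_to_upper_alt word
instance (word : String) (out : String) : Decidable (Spec_turn_lower_to_upper word out) := by unfold Spec_turn_lower_to_upper; infer_instance

-- ===== CLAIM (what is proved, stated in full; the proofs are below) =====
def Claim_equal_turn_lower_to_upper : Prop := ∀ (word : String), Dom_turn_lower_to_upper word → Pre_turn_lower_to_upper word → Spec_turn_lower_to_upper word (turn_lower_to_upper word)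

-- ===== LEMMAS AND PROOFS =====

theorem char_le_toNat (a c : Char) : a ≤ c ↔ a.toNat ≤ c.toNat := by
  rw [Char.le_def, UInt32.le_iff_toNat_le]; rfl

theorem islower_false_of_upper (c : Char) (h : 65 ≤ c.toNat ∧ c.toNat ≤ 90) :
    PySem.Chars.islower c = false := by
  have ha : ('a' : Char).toNat = 97 := rfl
  have hz : ('z' : Char).toNat = 122 := rfl
  simp only [PySem.Chars.islower, Bool.and_eq_false_iff, decide_eq_false_iff_not, char_le_toNat,
    ha, hz]
  omega

theorem islower_true_of_lower (c : Char) (h : 97 ≤ c.toNat ∧ c.toNat ≤ 122) :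
    PySem.Chars.islower c = true := by
  have ha : ('a' : Char).toNat = 97 := rfl
  have hz : ('z' : Char).toNat = 122 := rfl
  simp only [PySem.Chars.islower, Bool.and_eq_true, decide_eq_true_eq, char_le_toNat, ha, hz]
  omega

-- per character: on an ASCII letter, A's branch value is exactly upperChar
theorem step_eq_upperChar (c : Char)
    (h : (65 ≤ c.toNat ∧ c.toNat ≤ 90) ∨ (97 ≤ c.toNat ∧ c.toNat ≤ 122)) :
    (if 65 ≤ c.toNat ∧ c.toNat ≤ 90 then Char.ofNat c.toNat
     else Char.ofNat (c.toNat - 32)) = PySem.Chars.upperChar c := by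
  rcases h with h | h
  · rw [if_pos h]
    simp [PySem.Chars.upperChar, islower_false_of_upper c h, Char.ofNat_toNat]
  · have h1 : ¬ (65 ≤ c.toNat ∧ c.toNat ≤ 90) := by omega
    rw [if_neg h1]
    simp [PySem.Chars.upperChar, islower_true_of_lower c h]

-- A's fold over letters is appending the upperChar map
theorem foldA_eq_map (l : List Char)
    (h : ∀ c ∈ l, (65 ≤ c.toNat ∧ c.toNat ≤ 90) ∨ (97 ≤ c.toNat ∧ c.toNat ≤ 122)) :
    ∀ acc : List Char,
      l.foldl (fun result c =>
        let ascii_value := c.toNat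
        if 65 ≤ ascii_value ∧ ascii_value ≤ 90 then result ++ [Char.ofNat ascii_value]
        else if 97 ≤ ascii_value ∧ ascii_value ≤ 122 then result ++ [Char.ofNat (ascii_value - 32)]
        else result) acc = acc ++ l.map PySem.Chars.upperChar := by
  induction l with
  | nil => intro acc; simp
  | cons c l ih =>
    intro acc
    have hc := h c (List.mem_cons_self ..)
    have hl : ∀ x ∈ l, (65 ≤ x.toNat ∧ x.toNat ≤ 90) ∨ (97 ≤ x.toNat ∧ x.toNat ≤ 122) :=
      fun x hx => h x (List.mem_cons_of_mem _ hx)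
    simp only [List.foldl_cons, List.map_cons]
    rcases hc with hu | hlow
    · have hx : Char.ofNat c.toNat = PySem.Chars.upperChar c := by
        have := step_eq_upperChar c (Or.inl hu); rwa [if_pos hu] at this
      rw [if_pos hu, ih hl, hx]; simp
    · have h1 : ¬ (65 ≤ c.toNat ∧ c.toNat ≤ 90) := by omega
      have hx : Char.ofNat (c.toNat - 32) = PySem.Chars.upperChar c := by
        have := step_eq_upperChar c (Or.inr hlow); rwa [if_neg h1] at this
      rw [if_neg h1, if_pos hlow, ih hl, hx]; simp

-- ===== VERDICT (by name: the statement is the Claim_ definition above) =====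
theorem turn_lower_to_upper_spec : Claim_equal_turn_lower_to_upper := by
  intro word _ hpre0
  have hpre : ∀ c ∈ word.toList, (65 ≤ c.toNat ∧ c.toNat ≤ 90) ∨ (97 ≤ c.toNat ∧ c.toNat ≤ 122) := by
    simpa [Pre_turn_lower_to_upper, List.all_eq_true] using hpre0
  unfold Spec_turn_lower_to_upper turn_lower_to_upper turn_lower_to_upper_alt
  have hA : ('A' : Char).toNat = 65 := rfl
  have hZ : ('Z' : Char).toNat = 90 := rfl
  have ha : ('a' : Char).toNat = 97 := rfl
  have hz : ('z' : Char).toNat = 122 := rfl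
  have hall : word.toList.all (fun c => ('A' ≤ c && c ≤ 'Z') || ('a' ≤ c && c ≤ 'z')) = true := by
    simp only [List.all_eq_true, Bool.or_eq_true, Bool.and_eq_true, decide_eq_true_eq,
      char_le_toNat, hA, hZ, ha, hz]
    intro c hc
    have h := hpre c hc
    omega
  rw [if_pos hall, foldA_eq_map _ hpre]
  simp [PySem.Str.upper, PySem.Chars.upper]
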